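-- pv_equiv track=rewrite | github.com/chantera/coordparser | src/parsers/teranishi17.py | _split_coord
-- ===== SOURCE A (Python) =====
-- def _split_coord(coord, cc, seps):
--     spans = []
--     buf = []
--     for i in range(coord[0], cc):
--         if i not in seps:
--             buf.append(i)
--         elif len(buf) > 0:
--             spans.append((buf[0], buf[-1]))
--             buf = []
--     if len(buf) > 0:
--         spans.append((buf[0], buf[-1]))
--     if len(spans) == 0:
--         spans.append((coord[0], cc - 1))
--     right_begin = (cc + 1 if cc + 1 not in seps else cc + 2)
--     spans.append((right_begin, coord[1]))
--     assert len(spans) >= 2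
--     return spans
-- ===== SOURCE B (Python) =====
-- def _split_coord(coord, cc, seps):
--     s = set(seps)
--     idx = range(coord[0], cc)
--     starts = [i for i in idx if i not in s and (i == coord[0] or i - 1 in s)]
--     ends = [i for i in idx if i not in s and (i + 1 in s or i == cc - 1)]
--     spans = list(zip(starts, ends))
--     if not spans:
--         spans = [(coord[0], cc - 1)]
--     spans.append((cc + 2 if cc + 1 in s else cc + 1, coord[1]))
--     return spans
-- ===== Notes on version B (the rewrite author's own statement) =====
-- stated objective: alternative
-- what changed: Replaces the buffer-accumulate-and-flush loop by boundary detection: spans are obtained by zipping the list of run-start indices with the list of run-end indices (each a filter over the range), with membership tested against a set built once.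
import Mathlib
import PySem

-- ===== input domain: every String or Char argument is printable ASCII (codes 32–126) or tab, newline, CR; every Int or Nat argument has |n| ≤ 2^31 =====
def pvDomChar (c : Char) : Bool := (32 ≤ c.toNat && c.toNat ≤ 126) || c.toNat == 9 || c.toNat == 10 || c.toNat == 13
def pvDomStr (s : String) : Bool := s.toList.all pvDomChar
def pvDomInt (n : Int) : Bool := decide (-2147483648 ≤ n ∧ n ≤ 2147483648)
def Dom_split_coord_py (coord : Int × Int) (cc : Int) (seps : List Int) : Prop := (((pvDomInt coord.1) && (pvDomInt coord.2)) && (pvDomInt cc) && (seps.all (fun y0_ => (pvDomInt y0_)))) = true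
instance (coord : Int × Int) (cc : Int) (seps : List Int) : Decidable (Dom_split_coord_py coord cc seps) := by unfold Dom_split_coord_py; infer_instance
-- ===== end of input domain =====

-- B replaces A's buffer-accumulate-and-flush loop by detecting run boundaries: zip the run-start
-- indices with the run-end indices (two filters over the same range); alternative decomposition.

-- ===== PORT A =====
-- one loop step of A: 'if i not in seps: buf.append(i) elif len(buf)>0: spans.append((buf[0],buf[-1])); buf=[]'
def splitStepA (seps : List Int) (st : List (Int × Int) × List Int) (i : Int) :
    List (Int × Int) × List Int :=
  if ¬ seps.contains i then (st.1, st.2 ++ [i])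
  else if st.2.length > 0 then
    (st.1 ++ [((PySem.List.pyGet? st.2 0).getD 0, (PySem.List.pyGet? st.2 (-1)).getD 0)], [])
  else st

def split_coord_py (coord : Int × Int) (cc : Int) (seps : List Int) : List (Int × Int) :=
  let p := (PySem.List.pyRange coord.1 cc 1).foldl (splitStepA seps) ([], [])
  let spans :=
    if p.2.length > 0 then
      p.1 ++ [((PySem.List.pyGet? p.2 0).getD 0, (PySem.List.pyGet? p.2 (-1)).getD 0)]
    else p.1
  let spans := if spans.length = 0 then spans ++ [(coord.1, cc - 1)] else spans
  let right_begin := if ¬ seps.contains (cc + 1) then cc + 1 else cc + 2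
  spans ++ [(right_begin, coord.2)]

-- ===== PORT B =====
def split_coord_py_alt (coord : Int × Int) (cc : Int) (seps : List Int) : List (Int × Int) :=
  let s : PySem.Set Int := PySem.Set.ofList seps
  let idx := PySem.List.pyRange coord.1 cc 1
  let starts := idx.filter (fun i => ¬ s.contains i ∧ (i = coord.1 ∨ s.contains (i - 1)))
  let ends := idx.filter (fun i => ¬ s.contains i ∧ (s.contains (i + 1) ∨ i = cc - 1))
  let spans := starts.zip ends
  let spans := if spans = [] then [(coord.1, cc - 1)] else spans
  spans ++ [((if s.contains (cc + 1) then cc + 2 else cc + 1), coord.2)]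

-- ===== PRECONDITION & SPEC =====
def Spec_split_coord_py (coord : Int × Int) (cc : Int) (seps : List Int) (out : List (Int × Int)) : Prop := out = split_coord_py_alt coord cc seps
instance (coord : Int × Int) (cc : Int) (seps : List Int) (out : List (Int × Int)) : Decidable (Spec_split_coord_py coord cc seps out) := by unfold Spec_split_coord_py; infer_instance

-- ===== CLAIM (what is proved, stated in full; the proofs are below) =====
def Claim_equal_split_coord_py : Prop := ∀ (coord : Int × Int) (cc : Int) (seps : List Int), Dom_split_coord_py coord cc seps → Spec_split_coord_py coord cc seps (split_coord_py coord cc seps)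

-- ===== LEMMAS AND PROOFS =====

-- abbreviations used only in the proofs
def memS (seps : List Int) (i : Int) : Bool := seps.contains i

-- B's start/end filters, parameterised by the left edge a of the (remaining) range
def startsI (seps : List Int) (a cc : Int) : List Int :=
  (PySem.List.pyRange a cc 1).filter (fun i => ¬ memS seps i ∧ (i = a ∨ memS seps (i - 1)))
def startsT (seps : List Int) (a cc : Int) : List Int :=
  (PySem.List.pyRange a cc 1).filter (fun i => ¬ memS seps i ∧ memS seps (i - 1))
def endsI (seps : List Int) (a cc : Int) : List Int :=
  (PySem.List.pyRange a cc 1).filter (fun i => ¬ memS seps i ∧ (memS seps (i + 1) ∨ i = cc - 1))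

-- finishing step of A: flush a pending buffer
def finishA (st : List (Int × Int) × List Int) : List (Int × Int) :=
  if st.2.length > 0 then
    st.1 ++ [((PySem.List.pyGet? st.2 0).getD 0, (PySem.List.pyGet? st.2 (-1)).getD 0)]
  else st.1

theorem pyGet_zero_getD {xs : List Int} (h : xs ≠ []) :
    (PySem.List.pyGet? xs 0).getD 0 = xs.head h := by
  rw [PySem.List.pyGet?_zero]
  cases xs with
  | nil => simp at h
  | cons x xs => simp

theorem pyGet_neg_one_getD {xs : List Int} (h : xs ≠ []) :
    (PySem.List.pyGet? xs (-1)).getD 0 = xs.getLast h := by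
  rw [PySem.List.pyGet?_neg_one, List.getLast?_eq_some_getLast h]
  rfl

theorem contains_ofList (xs : List Int) (x : Int) :
    (PySem.Set.ofList xs).contains x = xs.contains x := by
  simp [PySem.Set.mem_ofList]

theorem startsI_skip (seps : List Int) (a cc : Int) (hm : memS seps a = true) (hlt : a < cc) :
    startsI seps a cc = startsI seps (a + 1) cc := by
  unfold startsI
  rw [PySem.List.pyRange_one_cons hlt]
  rw [List.filter_cons]
  have : ¬ (¬ memS seps a ∧ (a = a ∨ memS seps (a - 1))) := by simp [hm]
  simp only [decide_eq_true_eq] at *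
  rw [if_neg (by simpa using this)]
  apply List.filter_congr
  intro i hi
  have hr := PySem.List.mem_pyRange_one.mp hi
  simp only [decide_eq_decide]
  constructor
  · rintro ⟨h1, h2 | h2⟩
    · exact ⟨h1, Or.inl (by omega)⟩
    · exact ⟨h1, Or.inr h2⟩
  · rintro ⟨h1, h2 | h2⟩
    · subst h2; exact ⟨h1, Or.inr (by simpa using hm)⟩
    · exact ⟨h1, Or.inr h2⟩

theorem endsI_skip (seps : List Int) (a cc : Int) (hm : memS seps a = true) (hlt : a < cc) :
    endsI seps a cc = endsI seps (a + 1) cc := by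
  unfold endsI
  rw [PySem.List.pyRange_one_cons hlt, List.filter_cons]
  rw [if_neg (by simp [hm])]

theorem startsT_skip (seps : List Int) (a cc : Int) (hm : memS seps a = true) (hlt : a < cc) :
    startsT seps a cc = startsI seps (a + 1) cc := by
  unfold startsT startsI
  rw [PySem.List.pyRange_one_cons hlt, List.filter_cons]
  rw [if_neg (by simp [hm])]
  apply List.filter_congr
  intro i hi
  have hr := PySem.List.mem_pyRange_one.mp hi
  simp only [decide_eq_decide]
  constructor
  · rintro ⟨h1, h2⟩; exact ⟨h1, Or.inr h2⟩
  · rintro ⟨h1, h2 | h2⟩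
    · subst h2; exact ⟨h1, by simpa using hm⟩
    · exact ⟨h1, h2⟩

theorem startsT_cont (seps : List Int) (a cc : Int) (hm : memS seps (a - 1) = false) (hlt : a < cc) :
    startsT seps a cc = startsT seps (a + 1) cc := by
  unfold startsT
  rw [PySem.List.pyRange_one_cons hlt, List.filter_cons]
  rw [if_neg (by simp [hm])]

theorem startsI_open (seps : List Int) (a cc : Int) (hm : memS seps a = false) (hlt : a < cc) :
    startsI seps a cc = a :: startsT seps (a + 1) cc := by
  unfold startsI startsT
  rw [PySem.List.pyRange_one_cons hlt, List.filter_cons]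
  rw [if_pos (by simp [hm])]
  congr 1
  apply List.filter_congr
  intro i hi
  have hr := PySem.List.mem_pyRange_one.mp hi
  simp only [decide_eq_decide]
  constructor
  · rintro ⟨h1, h2 | h2⟩
    · omega
    · exact ⟨h1, h2⟩
  · rintro ⟨h1, h2⟩; exact ⟨h1, Or.inr h2⟩

theorem endsI_flush (seps : List Int) (a cc : Int) (hm1 : memS seps (a - 1) = false)
    (hm : memS seps a = true) (hlt : a < cc) :
    endsI seps (a - 1) cc = (a - 1) :: endsI seps (a + 1) cc := by
  unfold endsI
  rw [PySem.List.pyRange_one_cons (show a - 1 < cc by omega), List.filter_cons]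
  rw [if_pos (by simp only [decide_eq_true_eq]; exact ⟨by simp [hm1], Or.inl (by simpa [show a - 1 + 1 = a by ring] using hm)⟩)]
  rw [show a - 1 + 1 = a from by ring]
  rw [PySem.List.pyRange_one_cons hlt, List.filter_cons]
  rw [if_neg (by simp [hm])]

theorem endsI_cont (seps : List Int) (a cc : Int) (hm : memS seps a = false) (hlt : a < cc) :
    endsI seps (a - 1) cc = endsI seps a cc := by
  unfold endsI
  rw [PySem.List.pyRange_one_cons (show a - 1 < cc by omega), List.filter_cons]
  have hng : ¬ (decide (¬ memS seps (a-1) = true ∧ (memS seps (a - 1 + 1) = true ∨ a - 1 = cc - 1)) = true) := by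
    simp only [decide_eq_true_eq]
    rintro ⟨-, h | h⟩
    · rw [show a - 1 + 1 = a from by ring] at h; simp [hm] at h
    · omega
  rw [if_neg hng, show a - 1 + 1 = a from by ring]

-- the main loop invariant: the two cases (empty buffer / open run) proved together by induction on n
theorem loop_inv (seps : List Int) (cc : Int) : ∀ n : Nat,
    (∀ a : Int, cc = a + n → ∀ spans : List (Int × Int),
      finishA ((PySem.List.pyRange a cc 1).foldl (splitStepA seps) (spans, [])) =
        spans ++ (startsI seps a cc).zip (endsI seps a cc)) ∧
    (∀ a : Int, cc = a + n → ∀ (spans : List (Int × Int)) (h : Int) (buf : List Int)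
      (hne : buf ≠ []), buf.head hne = h → buf.getLast hne = a - 1 → seps.contains (a - 1) = false →
      finishA ((PySem.List.pyRange a cc 1).foldl (splitStepA seps) (spans, buf)) =
        spans ++ ((h :: startsT seps a cc).zip (endsI seps (a - 1) cc))) := by
  intro n
  induction n with
  | zero =>
    constructor
    · intro a hcc spans
      subst hcc
      rw [PySem.List.pyRange_one_eq_nil (by omega)]
      unfold startsI endsI
      rw [PySem.List.pyRange_one_eq_nil (by omega)]
      simp [finishA]
    · intro a hcc spans h buf hne hh hl hm
      subst hcc
      rw [PySem.List.pyRange_one_eq_nil (by omega)]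
      simp only [List.foldl_nil]
      unfold finishA
      rw [if_pos (by simpa using List.length_pos_iff.mpr hne)]
      rw [pyGet_zero_getD hne, pyGet_neg_one_getD hne, hh, hl]
      have hm2 : a - 1 ∉ seps := by simpa using hm
      unfold startsT endsI
      rw [PySem.List.pyRange_one_eq_nil (by omega)]
      rw [PySem.List.pyRange_one_cons (by omega : a - 1 < a + (0:Nat))]
      rw [PySem.List.pyRange_one_eq_nil (by omega)]
      rw [List.filter_cons]
      rw [if_pos (by simp only [decide_eq_true_eq]; exact ⟨by simp [memS, hm2], Or.inr (by omega)⟩)]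
      simp
  | succ n ih =>
    obtain ⟨ihP, ihQ⟩ := ih
    constructor
    · intro a hcc spans
      have hlt : a < cc := by omega
      rw [PySem.List.pyRange_one_cons hlt, List.foldl_cons]
      by_cases hm : seps.contains a = true
      · have hma : a ∈ seps := by simpa using hm
        have hstep : splitStepA seps (spans, []) a = (spans, []) := by
          simp [splitStepA, hma]
        rw [hstep, ihP (a + 1) (by omega) spans,
          startsI_skip seps a cc hm hlt,
          endsI_skip seps a cc hm hlt]
      · have hm' : seps.contains a = false := by simpa using hm
        have hma : a ∉ seps := by simpa using hm
        have hstep : splitStepA seps (spans, []) a = (spans, [a]) := by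
          simp [splitStepA, hma]
        rw [hstep]
        rw [ihQ (a + 1) (by omega) spans a [a] (by simp) (by simp) (by simp)
          (by rw [show a + 1 - 1 = a from by ring]; exact hm')]
        rw [startsI_open seps a cc hm' hlt]
        rw [show a + 1 - 1 = a from by ring]
    · intro a hcc spans h buf hne hh hl hmprev
      have hlt : a < cc := by omega
      have hb : 0 < buf.length := List.length_pos_iff.mpr hne
      rw [PySem.List.pyRange_one_cons hlt, List.foldl_cons]
      by_cases hm : seps.contains a = true
      · have hstep : splitStepA seps (spans, buf) a = (spans ++ [(h, a - 1)], []) := by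
          unfold splitStepA
          rw [if_neg (by simpa using hm), if_pos (by simpa using hb)]
          rw [pyGet_zero_getD hne, pyGet_neg_one_getD hne, hh, hl]
        rw [hstep, ihP (a + 1) (by omega) (spans ++ [(h, a - 1)])]
        rw [← startsT_skip seps a cc hm hlt]
        rw [endsI_flush seps a cc hmprev hm hlt]
        simp
      · have hm' : seps.contains a = false := by simpa using hm
        have hma : a ∉ seps := by simpa using hm
        have hstep : splitStepA seps (spans, buf) a = (spans, buf ++ [a]) := by
          simp [splitStepA, hma]
        rw [hstep]
        rw [ihQ (a + 1) (by omega) spans h (buf ++ [a]) (by simp)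
          (by rw [List.head_append_of_ne_nil hne]; exact hh)
          (by rw [List.getLast_concat]; ring)
          (by rw [show a + 1 - 1 = a from by ring]; exact hm')]
        rw [startsT_cont seps a cc hmprev hlt]
        rw [show a + 1 - 1 = a from by ring]
        rw [endsI_cont seps a cc hm' hlt]

-- ===== VERDICT (by name: the statement is the Claim_ definition above) =====
theorem split_coord_py_spec : Claim_equal_split_coord_py := by
  intro coord cc seps _
  unfold Spec_split_coord_py
  have hA : split_coord_py coord cc seps =
      (let core := finishA ((PySem.List.pyRange coord.1 cc 1).foldl (splitStepA seps) ([], []));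
       (if core.length = 0 then core ++ [(coord.1, cc - 1)] else core) ++
         [((if ¬ seps.contains (cc + 1) then cc + 1 else cc + 2), coord.2)]) := rfl
  have hB : split_coord_py_alt coord cc seps =
      (let spans := (startsI seps coord.1 cc).zip (endsI seps coord.1 cc);
       (if spans = [] then [(coord.1, cc - 1)] else spans) ++
         [((if seps.contains (cc + 1) then cc + 2 else cc + 1), coord.2)]) := by
    unfold split_coord_py_alt startsI endsI memS
    simp only [contains_ofList]
  have hcore : finishA ((PySem.List.pyRange coord.1 cc 1).foldl (splitStepA seps) ([], [])) =
      (startsI seps coord.1 cc).zip (endsI seps coord.1 cc) := by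
    by_cases hle : coord.1 ≤ cc
    · have := (loop_inv seps cc (cc - coord.1).toNat).1 coord.1 (by omega) []
      simpa using this
    · rw [PySem.List.pyRange_one_eq_nil (by omega)]
      unfold startsI endsI
      rw [PySem.List.pyRange_one_eq_nil (by omega)]
      simp [finishA]
  rw [hA, hB]
  simp only [hcore]
  by_cases hZ : (startsI seps coord.1 cc).zip (endsI seps coord.1 cc) = []
  · simp [hZ]
  · rw [if_neg (by simpa [List.length_eq_zero_iff] using hZ), if_neg hZ]
    simp
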